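-- pv_equiv track=rewrite | github.com/ChanMeng666/juejin-algorithm-practice | juejin21-30/juejin22.py | solution
-- ===== SOURCE A (Python) =====
-- def solution(S: str) -> int:
--     # PLEASE DO NOT MODIFY THE FUNCTION SIGNATURE
--     # write code here
--     # 统计每个字符的出现次数
--     char_count = {}
--     for c in S:
--         char_count[c] = char_count.get(c, 0) + 1
--
--     operations = 0
--     # 对于每个出现次数大于1的字符
--     for count in char_count.values():
--         # 如果字符出现次数大于1
--         # 每次操作删除2个字符，所以需要 (count//2) 次操作
--         operations += count // 2
--
--     return operations
-- ===== SOURCE B (Python) =====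
-- def solution(S: str) -> int:
--     # One pass: keep the set of characters seen an odd number of times;
--     # each time a character recurs while unpaired, a pair is completed.
--     unpaired = set()
--     operations = 0
--     for c in S:
--         if c in unpaired:
--             unpaired.discard(c)
--             operations += 1
--         else:
--             unpaired.add(c)
--     return operations
-- ===== Notes on version B (the rewrite author's own statement) =====
-- stated objective: alternative
-- what changed: Replaces the two-pass build-a-frequency-dict-then-sum-count//2 structure with a single pass that maintains the set of odd-parity characters and counts a pair the moment it completes.
import Mathlib
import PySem

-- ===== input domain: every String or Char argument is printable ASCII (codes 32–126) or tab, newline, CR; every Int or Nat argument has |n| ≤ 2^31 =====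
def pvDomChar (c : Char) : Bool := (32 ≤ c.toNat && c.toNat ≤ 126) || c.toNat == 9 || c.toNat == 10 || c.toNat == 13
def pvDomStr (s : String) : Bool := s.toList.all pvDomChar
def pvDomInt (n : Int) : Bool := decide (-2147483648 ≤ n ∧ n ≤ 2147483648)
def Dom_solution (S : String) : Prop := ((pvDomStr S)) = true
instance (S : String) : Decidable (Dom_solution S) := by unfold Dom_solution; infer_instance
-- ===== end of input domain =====

-- B replaces A's two-pass count-then-sum structure with one pass tallying pairs as they
-- complete via a set of odd-parity characters (alternative decomposition, same cost).

-- ===== PORT A =====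
def solution (S : String) : Int :=
  let char_count :=
    S.toList.foldl (fun (d : PySem.Dict Char Int) c => d.insert c (d.getD c 0 + 1))
      PySem.Dict.empty
  char_count.values.foldl (fun operations count => operations + PySem.Int.floordiv count 2) 0

-- ===== PORT B =====
def solution_alt (S : String) : Int :=
  (S.toList.foldl
      (fun (st : PySem.Set Char × Int) c =>
        if PySem.Set.contains st.1 c then (PySem.Set.discard st.1 c, st.2 + 1)
        else (PySem.Set.add st.1 c, st.2))
      (PySem.Set.empty, 0)).2

-- ===== PRECONDITION & SPEC =====
def Spec_solution (S : String) (out : Int) : Prop := out = solution_alt S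
instance (S : String) (out : Int) : Decidable (Spec_solution S out) := by unfold Spec_solution; infer_instance

-- ===== CLAIM (what is proved, stated in full; the proofs are below) =====
def Claim_equal_solution : Prop := ∀ (S : String), Dom_solution S → Spec_solution S (solution S)

-- ===== LEMMAS AND PROOFS =====

-- the common value both ports compute: sum over the distinct characters of count // 2
def pairSum (l : List Char) : Int :=
  ((PySem.Set.ofList l).map (fun k => ((l.count k / 2 : Nat) : Int))).sum

lemma solution_eq_pairSum (S : String) : solution S = pairSum S.toList := by
  unfold solution pairSum
  rw [PySem.Dict.foldl_insert_getD_add_one_eq_counter,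
      PySem.List.foldl_add (g := fun v => PySem.Int.floordiv v 2)]
  simp only [PySem.Dict.values, PySem.Dict.items_counter, List.map_map, zero_add]
  refine congrArg List.sum (List.map_congr_left ?_)
  intro k _
  simp only [Function.comp_apply]
  rw [show ((2 : Int) = ((2 : Nat) : Int)) from rfl, PySem.Int.floordiv_natCast]

-- sums over a Nodup list of maps that agree except at one member
lemma sum_map_delta {α : Type} [DecidableEq α] (s : List α) (hs : s.Nodup) (c : α)
    (hc : c ∈ s) (f g : α → Int) (h1 : ∀ k ∈ s, k ≠ c → f k = g k) :
    (s.map f).sum = (s.map g).sum + (f c - g c) := by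
  induction s with
  | nil => cases hc
  | cons a t ih =>
    rcases List.nodup_cons.mp hs with ⟨ha, ht⟩
    by_cases hac : a = c
    · subst hac
      have : t.map f = t.map g := by
        apply List.map_congr_left
        intro k hk
        exact h1 k (List.mem_cons_of_mem _ hk) (fun h => ha (h ▸ hk))
      simp [this]; ring
    · have hct : c ∈ t := by
        rcases List.mem_cons.mp hc with h | h
        · exact absurd h.symm hac
        · exact h
      have hfa : f a = g a := h1 a (List.mem_cons_self) hac
      have := ih ht hct (fun k hk hkc => h1 k (List.mem_cons_of_mem _ hk) hkc)
      simp [hfa, this]; ring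

-- the loop invariant of B: the set holds exactly the odd-count characters,
-- and the counter equals pairSum of the processed prefix
lemma loop_inv (l : List Char) :
    (∀ c, c ∈ (l.foldl
        (fun (st : PySem.Set Char × Int) c =>
          if PySem.Set.contains st.1 c then (PySem.Set.discard st.1 c, st.2 + 1)
          else (PySem.Set.add st.1 c, st.2))
        (PySem.Set.empty, 0)).1 ↔ l.count c % 2 = 1) ∧
    (l.foldl
        (fun (st : PySem.Set Char × Int) c =>
          if PySem.Set.contains st.1 c then (PySem.Set.discard st.1 c, st.2 + 1)
          else (PySem.Set.add st.1 c, st.2))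
        (PySem.Set.empty, 0)).2 = pairSum l := by
  induction l using List.reverseRecOn with
  | nil => simp [pairSum, PySem.Set.empty, PySem.Set.ofList]
  | append_singleton l c ih =>
    rw [List.foldl_append]
    obtain ⟨ihmem, ihsum⟩ := ih
    set st := l.foldl
        (fun (st : PySem.Set Char × Int) c =>
          if PySem.Set.contains st.1 c then (PySem.Set.discard st.1 c, st.2 + 1)
          else (PySem.Set.add st.1 c, st.2))
        (PySem.Set.empty, 0) with hst
    simp only [List.foldl_cons, List.foldl_nil]
    by_cases hc : c ∈ st.1
    · -- c seen an odd number of times: a pair completes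
      have hcont : PySem.Set.contains st.1 c = true := (PySem.Set.contains_iff _ _).mpr hc
      rw [if_pos hcont]
      have hodd : l.count c % 2 = 1 := (ihmem c).mp hc
      have hcl : c ∈ l := by
        rw [← List.count_pos_iff]; omega
      constructor
      · intro k
        rw [PySem.Set.mem_discard, ihmem, List.count_append]
        by_cases hkc : k = c
        · subst hkc
          simp only [List.count_singleton, ne_eq]
          simp; omega
        · have : List.count k [c] = 0 := by
            simp [List.count_singleton, hkc, Ne.symm hkc]
          rw [this]
          simp [hkc]
      · show st.2 + 1 = pairSum (l ++ [c])
        rw [ihsum]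
        unfold pairSum
        rw [PySem.Set.ofList_append_singleton,
            PySem.Set.add_of_mem ((PySem.Set.mem_ofList _ _).mpr hcl)]
        rw [sum_map_delta (PySem.Set.ofList l) (PySem.Set.nodup_ofList l) c
              ((PySem.Set.mem_ofList _ _).mpr hcl)
              (f := fun k => (((l ++ [c]).count k / 2 : Nat) : Int))
              (g := fun k => ((l.count k / 2 : Nat) : Int))]
        · have hcc : (l ++ [c]).count c = l.count c + 1 := by
            simp [List.count_append]
          have : ((((l ++ [c]).count c / 2 : Nat) : Int)) = ((l.count c / 2 : Nat) : Int) + 1 := by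
            rw [hcc]
            have : (l.count c + 1) / 2 = l.count c / 2 + 1 := by omega
            rw [this]; push_cast; ring
          rw [this]; ring
        · intro k _ hkc
          have : (l ++ [c]).count k = l.count k := by
            simp [List.count_append, List.count_singleton, hkc, Ne.symm hkc]
          rw [this]
    · -- c seen an even number of times so far
      have hcont : ¬ (PySem.Set.contains st.1 c = true) := by
        intro h
        exact hc ((PySem.Set.contains_iff _ _).mp h)
      rw [if_neg hcont]
      have heven : l.count c % 2 = 0 := by
        have := (ihmem c).not.mp hc; omega
      constructor
      · intro k
        rw [PySem.Set.mem_add, ihmem, List.count_append]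
        by_cases hkc : k = c
        · subst hkc
          simp only [List.count_singleton]
          simp; omega
        · have : List.count k [c] = 0 := by
            simp [List.count_singleton, hkc, Ne.symm hkc]
          rw [this]
          simp [hkc]
      · show st.2 = pairSum (l ++ [c])
        rw [ihsum]
        unfold pairSum
        rw [PySem.Set.ofList_append_singleton]
        by_cases hcl : c ∈ l
        · rw [PySem.Set.add_of_mem ((PySem.Set.mem_ofList _ _).mpr hcl)]
          refine congrArg List.sum (List.map_congr_left ?_)
          intro k _
          by_cases hkc : k = c
          · subst hkc
            have h1 : (l ++ [k]).count k = l.count k + 1 := by simp [List.count_append]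
            have h2 : (l.count k + 1) / 2 = l.count k / 2 := by omega
            rw [h1, h2]
          · have : (l ++ [c]).count k = l.count k := by
              simp [List.count_append, List.count_singleton, hkc, Ne.symm hkc]
            rw [this]
        · rw [PySem.Set.add_of_not_mem (fun h => hcl ((PySem.Set.mem_ofList _ _).mp h))]
          have hc0 : l.count c = 0 := List.count_eq_zero.mpr hcl
          rw [List.map_append, List.sum_append]
          have hlast : ([c].map (fun k => (((l ++ [c]).count k / 2 : Nat) : Int))).sum = 0 := by
            simp [List.count_append, hc0]
          rw [hlast, add_zero]
          refine (congrArg List.sum (List.map_congr_left ?_)).symm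
          intro k hk
          have hkc : k ≠ c := fun h => hcl (h ▸ (PySem.Set.mem_ofList _ _).mp hk)
          have : (l ++ [c]).count k = l.count k := by
            simp [List.count_append, List.count_singleton, hkc, Ne.symm hkc]
          rw [this]

-- ===== VERDICT (by name: the statement is the Claim_ definition above) =====
theorem solution_spec : Claim_equal_solution := by
  intro S _
  unfold Spec_solution solution_alt
  rw [solution_eq_pairSum, (loop_inv S.toList).2]
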